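-- pv_equiv track=rewrite | github.com/gomljo/codingtest | Programmers/행렬 테두리 회전하기.py | clockwise_transform
-- ===== SOURCE A (Python) =====
-- from collections import deque
--
-- def clockwise_transform(matrix, coordinates):
--     # queue를 이용하여 순서 바꾸기
--     queue = deque()
--     for coordinate in coordinates:
--         num = matrix[coordinate[0] - 1][coordinate[1] - 1]
--         queue.append(num)
--     min_val = min(queue)
--     first_element = queue.popleft()
--     queue.append(first_element)
--
--     for coordinate in coordinates:
--         matrix[coordinate[0] - 1][coordinate[1] - 1] = queue.popleft()
--
--     return matrix, min_val
-- ===== SOURCE B (Python) =====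
-- def clockwise_transform(matrix, coordinates):
--     values = [matrix[c[0] - 1][c[1] - 1] for c in coordinates]
--     min_val = min(values)
--     n = len(values)
--     for i, c in enumerate(coordinates):
--         matrix[c[0] - 1][c[1] - 1] = values[(i + 1) % n]
--     return matrix, min_val
-- ===== Notes on version B (the rewrite author's own statement) =====
-- stated objective: simpler
-- what changed: Replaces the deque popleft/append rotation and the pop-one-per-coordinate drain by a plain list of path values written back with modular indexing values[(i+1)%n] via enumerate.
import Mathlib
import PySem

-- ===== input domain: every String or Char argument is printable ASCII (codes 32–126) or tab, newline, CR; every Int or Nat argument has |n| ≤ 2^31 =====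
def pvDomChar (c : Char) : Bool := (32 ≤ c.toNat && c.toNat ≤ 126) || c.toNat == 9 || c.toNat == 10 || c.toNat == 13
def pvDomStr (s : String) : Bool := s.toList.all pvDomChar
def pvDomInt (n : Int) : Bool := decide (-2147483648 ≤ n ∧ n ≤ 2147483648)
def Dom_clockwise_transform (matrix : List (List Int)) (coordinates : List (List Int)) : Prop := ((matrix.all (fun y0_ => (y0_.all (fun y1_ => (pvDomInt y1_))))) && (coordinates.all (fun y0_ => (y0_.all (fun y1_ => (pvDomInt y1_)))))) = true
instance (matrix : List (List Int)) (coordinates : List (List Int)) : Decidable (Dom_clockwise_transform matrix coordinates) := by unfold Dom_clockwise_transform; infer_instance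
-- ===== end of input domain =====

-- B replaces A's deque popleft/append rotation and pop-per-coordinate drain by a value
-- list written back with modular indexing (simpler); both mutate `matrix` in place in
-- Python — the equivalence proved here is about the returned value.

-- ===== PORT A =====
-- literal port: build the deque of path values, take its min, rotate it by one
-- popleft/append, then drain it one popleft per coordinate into the matrix
def clockwise_transform (matrix : List (List Int)) (coordinates : List (List Int)) : List (List Int) × Int :=
  let queue : List Int := coordinates.foldl (fun q c =>
    q ++ [PySem.List.pyGetD (PySem.List.pyGetD matrix (PySem.List.pyGetD c 0 0 - 1) [])
            (PySem.List.pyGetD c 1 0 - 1) 0]) []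
  let min_val : Int := (PySem.List.min? queue (fun x => x)).getD 0
  let queue2 : List Int :=
    match queue with
    | [] => []            -- popleft on an empty deque raises in Python; Pre_ excludes it
    | x :: xs => xs ++ [x]
  let st := coordinates.foldl (fun (st : List (List Int) × List Int) c =>
    match st.2 with
    | [] => st            -- unreachable totality guard (queue has one value per coordinate)
    | v :: rest =>
        (PySem.List.pySetD st.1 (PySem.List.pyGetD c 0 0 - 1)
          (PySem.List.pySetD (PySem.List.pyGetD st.1 (PySem.List.pyGetD c 0 0 - 1) [])
            (PySem.List.pyGetD c 1 0 - 1) v), rest)) (matrix, queue2)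
  (st.1, min_val)

-- ===== PORT B =====
-- literal port of Source B: comprehension of values, min, write back values[(i+1) % n]
def clockwise_transform_alt (matrix : List (List Int)) (coordinates : List (List Int)) : List (List Int) × Int :=
  let values : List Int := coordinates.map (fun c =>
    PySem.List.pyGetD (PySem.List.pyGetD matrix (PySem.List.pyGetD c 0 0 - 1) [])
      (PySem.List.pyGetD c 1 0 - 1) 0)
  let min_val : Int := (PySem.List.min? values (fun x => x)).getD 0
  let n : Int := (values.length : Int)
  let m := (PySem.List.enumerate coordinates 0).foldl (fun mat ic =>
    PySem.List.pySetD mat (PySem.List.pyGetD ic.2 0 0 - 1)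
      (PySem.List.pySetD (PySem.List.pyGetD mat (PySem.List.pyGetD ic.2 0 0 - 1) [])
        (PySem.List.pyGetD ic.2 1 0 - 1)
        (PySem.List.pyGetD values (PySem.Int.mod (ic.1 + 1) n) 0))) matrix
  (m, min_val)

-- ===== PRECONDITION & SPEC =====
-- Pre_ excludes exactly the inputs where Python A raises: empty coordinates (min of an
-- empty deque is a ValueError) and coordinates whose entries are missing or index out
-- of range (IndexError).
def Pre_clockwise_transform (matrix : List (List Int)) (coordinates : List (List Int)) : Prop :=
  coordinates ≠ [] ∧ ∀ c ∈ coordinates,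
    PySem.Raise.InRange c.length 0 ∧ PySem.Raise.InRange c.length 1 ∧
    PySem.Raise.InRange matrix.length (PySem.List.pyGetD c 0 0 - 1) ∧
    PySem.Raise.InRange (PySem.List.pyGetD matrix (PySem.List.pyGetD c 0 0 - 1) []).length
      (PySem.List.pyGetD c 1 0 - 1)
instance (matrix : List (List Int)) (coordinates : List (List Int)) : Decidable (Pre_clockwise_transform matrix coordinates) := by unfold Pre_clockwise_transform; infer_instance

def pvWitness_clockwise_transform : List (List Int) × List (List Int) :=
  ([[1, 2], [3, 4]], [[1, 1], [1, 2], [2, 2], [2, 1]])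

def Spec_clockwise_transform (matrix : List (List Int)) (coordinates : List (List Int)) (out : List (List Int) × Int) : Prop := out = clockwise_transform_alt matrix coordinates
instance (matrix : List (List Int)) (coordinates : List (List Int)) (out : List (List Int) × Int) : Decidable (Spec_clockwise_transform matrix coordinates out) := by unfold Spec_clockwise_transform; infer_instance

-- ===== CLAIM (what is proved, stated in full; the proofs are below) =====
def Claim_equal_clockwise_transform : Prop := ∀ (matrix : List (List Int)) (coordinates : List (List Int)), Dom_clockwise_transform matrix coordinates → Pre_clockwise_transform matrix coordinates → Spec_clockwise_transform matrix coordinates (clockwise_transform matrix coordinates)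

-- ===== LEMMAS AND PROOFS =====

-- the single write `matrix[c[0]-1][c[1]-1] = v`, shared shape of both loops
def pvWrite (m : List (List Int)) (c : List Int) (v : Int) : List (List Int) :=
  PySem.List.pySetD m (PySem.List.pyGetD c 0 0 - 1)
    (PySem.List.pySetD (PySem.List.pyGetD m (PySem.List.pyGetD c 0 0 - 1) [])
      (PySem.List.pyGetD c 1 0 - 1) v)

lemma foldA_nilq (coords : List (List Int)) (m : List (List Int)) :
    coords.foldl (fun (st : List (List Int) × List Int) c =>
      match st.2 with
      | [] => st
      | v :: rest => (pvWrite st.1 c v, rest)) (m, []) = (m, []) := by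
  induction coords with
  | nil => rfl
  | cons c cs ih => simpa using ih

lemma foldA_eq (coords : List (List Int)) :
    ∀ (q : List Int) (m : List (List Int)),
    (coords.foldl (fun (st : List (List Int) × List Int) c =>
      match st.2 with
      | [] => st
      | v :: rest => (pvWrite st.1 c v, rest)) (m, q)).1
    = (coords.zip q).foldl (fun m p => pvWrite m p.1 p.2) m := by
  induction coords with
  | nil => intro q m; rfl
  | cons c cs ih =>
    intro q m
    cases q with
    | nil => simp [foldA_nilq]
    | cons v rest => simpa using ih rest (pvWrite m c v)

lemma foldB_eq (g : Int → Int) (coords : List (List Int)) :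
    ∀ (s : Int) (m : List (List Int)),
    (PySem.List.enumerate coords s).foldl (fun mat ic => pvWrite mat ic.2 (g ic.1)) m
    = (coords.zip ((List.range coords.length).map (fun (k : Nat) => g (s + (k : Int))))).foldl
        (fun m p => pvWrite m p.1 p.2) m := by
  induction coords with
  | nil => intro s m; rfl
  | cons c cs ih =>
    intro s m
    rw [PySem.List.enumerate_cons, List.foldl_cons]
    have hmap : (List.range (c :: cs).length).map (fun (k : Nat) => g (s + (k : Int)))
        = g s :: (List.range cs.length).map (fun (k : Nat) => g ((s + 1) + (k : Int))) := by
      rw [List.length_cons, List.range_succ_eq_map, List.map_cons, List.map_map]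
      refine congrArg₂ _ (by simp) (List.map_congr_left ?_)
      intro a _
      simp only [Function.comp_apply, Nat.cast_succ]
      ring_nf
    rw [hmap, List.zip_cons_cons, List.foldl_cons, ih (s + 1)]

lemma rot_eq (v : Int) (vs : List Int) :
    (List.range (v :: vs).length).map
      (fun (k : Nat) => PySem.List.pyGetD (v :: vs) (PySem.Int.mod ((k : Int) + 1) ((v :: vs).length : Int)) 0)
    = vs ++ [v] := by
  apply List.ext_getElem
  · simp
  · intro k hk hk'
    simp only [List.getElem_map, List.getElem_range]
    have hklt : k < vs.length + 1 := by simpa using hk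
    have hpos : (0 : Int) < ((v :: vs).length : Int) := by simp
    rw [PySem.Int.mod_eq_emod_of_pos hpos]
    by_cases hlast : k = vs.length
    · have : ((k : Int) + 1) % ((v :: vs).length : Int) = 0 := by
        subst hlast; simp
      rw [this]
      have : (vs ++ [v])[k] = v := by
        subst hlast; simp
      simpa [PySem.List.pyGetD_zero_cons] using this.symm
    · have hklt' : k < vs.length := by omega
      have hmod : ((k : Int) + 1) % ((v :: vs).length : Int) = (k : Int) + 1 := by
        apply Int.emod_eq_of_lt <;> [omega; (simp; omega)]
      rw [hmod]
      have hcast : ((k : Int) + 1) = ((k + 1 : Nat) : Int) := by push_cast; ring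
      rw [hcast, PySem.List.pyGetD_natCast]
      simp [List.getD_eq_getElem?_getD, hklt']

theorem clockwise_transform_spec : Claim_equal_clockwise_transform := by
  intro matrix coordinates _hdom hpre
  unfold Spec_clockwise_transform clockwise_transform clockwise_transform_alt
  obtain ⟨hne, -⟩ := hpre
  simp only []
  -- name the shared value list
  set f : List Int → Int := fun c =>
    PySem.List.pyGetD (PySem.List.pyGetD matrix (PySem.List.pyGetD c 0 0 - 1) [])
      (PySem.List.pyGetD c 1 0 - 1) 0 with hf
  have hqueue : coordinates.foldl (fun q c => q ++ [f c]) [] = coordinates.map f := by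
    simpa using PySem.List.foldl_append_singleton_eq_map f coordinates []
  rw [hqueue]
  cases hvals : coordinates.map f with
  | nil => exact absurd (List.map_eq_nil_iff.mp hvals) hne
  | cons v vs =>
    have hlen : coordinates.length = (v :: vs).length := by
      rw [← hvals]; simp
    rw [Prod.mk.injEq]
    refine ⟨?_, rfl⟩
    change (coordinates.foldl (fun (st : List (List Int) × List Int) c =>
        match st.2 with
        | [] => st
        | v :: rest => (pvWrite st.1 c v, rest)) (matrix, vs ++ [v])).1
      = (PySem.List.enumerate coordinates 0).foldl (fun mat ic =>
          pvWrite mat ic.2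
            (PySem.List.pyGetD (v :: vs) (PySem.Int.mod (ic.1 + 1) ((v :: vs).length : Int)) 0)) matrix
    rw [foldA_eq coordinates (vs ++ [v]) matrix,
      foldB_eq (fun i => PySem.List.pyGetD (v :: vs) (PySem.Int.mod (i + 1) ((v :: vs).length : Int)) 0)
        coordinates 0 matrix]
    congr 1
    rw [hlen]
    refine congrArg _ ?_
    simpa using (rot_eq v vs).symm

-- ===== VERDICT =====
-- (theorem clockwise_transform_spec is stated above by name)
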